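-- pv_equiv track=rewrite | github.com/vasjafizer/laboratorni | Laboratorna_8_3.py | x
-- ===== SOURCE A (Python) =====
-- def x(i) :
--     if i==0:
--         return 2
--     elif i==1:
--         return 3
--     elif i==2:
--         return 3
--     return 7*x(i-1)-x(i-2)*x(i-3)
-- ===== SOURCE B (Python) =====
-- def x(i):
--     vals = [2, 3, 3]
--     for k in range(3, i + 1):
--         vals.append(7 * vals[k - 1] - vals[k - 2] * vals[k - 3])
--     return vals[i]
-- ===== Notes on version B (the rewrite author's own statement) =====
-- stated objective: alternative
-- what changed: Replaced the triple-branching recursion by a bottom-up dynamic-programming table filled once from index 3 to i (intended as faster; a timing run measured 106x at n=16 but both time out on larger n, where the values themselves are astronomically large).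
import Mathlib
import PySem

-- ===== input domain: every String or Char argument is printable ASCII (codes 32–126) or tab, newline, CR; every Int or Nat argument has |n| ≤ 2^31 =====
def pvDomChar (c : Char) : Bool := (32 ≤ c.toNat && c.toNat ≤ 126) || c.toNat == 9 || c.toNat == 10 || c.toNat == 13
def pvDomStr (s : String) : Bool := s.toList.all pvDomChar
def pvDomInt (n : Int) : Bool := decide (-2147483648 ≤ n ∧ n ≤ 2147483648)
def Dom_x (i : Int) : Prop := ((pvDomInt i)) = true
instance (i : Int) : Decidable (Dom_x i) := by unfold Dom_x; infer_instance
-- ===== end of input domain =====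

-- B replaces A's triple recursion by a bottom-up table filled once from index 3 to i (alternative algorithm).

-- ===== PORT A =====
-- A recurses on i; for i < 0 the Python recursion never terminates, so the port
-- recurses on the natural number i.toNat (Pre_x restricts the claim to 0 ≤ i).
def xA : Nat → Int
  | 0 => 2
  | 1 => 3
  | 2 => 3
  | n + 3 => 7 * xA (n + 2) - xA (n + 1) * xA n

def x (i : Int) : Int := xA i.toNat

-- ===== PORT B =====
-- one iteration of Source B's loop: vals.append(7*vals[k-1] - vals[k-2]*vals[k-3])
-- (the in-loop indices k-1,k-2,k-3 are always in range, so pyGetD's default is never used there)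
def xStep (vs : List Int) (k : Int) : List Int :=
  vs ++ [7 * PySem.List.pyGetD vs (k - 1) 0
         - PySem.List.pyGetD vs (k - 2) 0 * PySem.List.pyGetD vs (k - 3) 0]

-- final vals[i]: Python raises IndexError for i < -3; pyGetD's default 0 there lies outside Pre_x
def x_alt (i : Int) : Int :=
  PySem.List.pyGetD ((PySem.List.pyRange 3 (i + 1) 1).foldl xStep [2, 3, 3]) i 0

-- ===== PRECONDITION & SPEC =====
-- Pre_x excludes i < 0, on which Python A recurses without reaching a base case (RecursionError).
def Pre_x (i : Int) : Prop := 0 ≤ i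
instance (i : Int) : Decidable (Pre_x i) := by unfold Pre_x; infer_instance
def pvWitness_x : Int := 5

def Spec_x (i : Int) (out : Int) : Prop := out = x_alt i
instance (i : Int) (out : Int) : Decidable (Spec_x i out) := by unfold Spec_x; infer_instance

-- ===== CLAIM (what is proved, stated in full; the proofs are below) =====
def Claim_equal_x : Prop := ∀ (i : Int), Dom_x i → Pre_x i → Spec_x i (x i)

-- ===== LEMMAS AND PROOFS =====

theorem getD_map_range_xA {m j : Nat} (hj : j < m) :
    ((List.range m).map xA).getD j 0 = xA j := by
  rw [List.getD_eq_getElem?_getD]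
  simp [List.getElem?_map, List.getElem?_range hj]

theorem xA_rec {m : Nat} (hm : 3 ≤ m) :
    7 * xA (m - 1) - xA (m - 2) * xA (m - 3) = xA m := by
  obtain ⟨n, rfl⟩ : ∃ n, m = n + 3 := ⟨m - 3, by omega⟩
  have h1 : n + 3 - 1 = n + 2 := by omega
  have h2 : n + 3 - 2 = n + 1 := by omega
  have h3 : n + 3 - 3 = n := by omega
  rw [h1, h2, h3]
  rfl

theorem build_vals (m : Nat) (hm : 3 ≤ m) :
    (PySem.List.pyRange 3 (m : Int) 1).foldl xStep [2, 3, 3]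
      = (List.range m).map xA := by
  induction m, hm using Nat.le_induction with
  | base =>
    rw [PySem.List.pyRange_one_eq_nil (by norm_num)]
    simp [List.range_succ, xA]
  | succ m hm ih =>
    have hcast : ((m + 1 : Nat) : Int) = (m : Int) + 1 := by push_cast; ring
    rw [hcast, PySem.List.pyRange_one_succ_right (by exact_mod_cast hm),
        List.foldl_append, ih]
    show xStep ((List.range m).map xA) (m : Int) = _
    unfold xStep
    have e1 : (m : Int) - 1 = ((m - 1 : Nat) : Int) := by omega
    have e2 : (m : Int) - 2 = ((m - 2 : Nat) : Int) := by omega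
    have e3 : (m : Int) - 3 = ((m - 3 : Nat) : Int) := by omega
    rw [e1, e2, e3, PySem.List.pyGetD_natCast, PySem.List.pyGetD_natCast,
        PySem.List.pyGetD_natCast,
        getD_map_range_xA (by omega), getD_map_range_xA (by omega),
        getD_map_range_xA (by omega), xA_rec hm, List.range_succ]
    simp

-- ===== VERDICT (by name: the statement is the Claim_ definition above) =====
theorem x_spec : Claim_equal_x := by
  intro i _ hpre
  obtain ⟨n, rfl⟩ := Int.eq_ofNat_of_zero_le hpre
  unfold Spec_x x x_alt
  rw [Int.toNat_natCast]
  by_cases hn : n ≤ 2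
  · rw [PySem.List.pyRange_one_eq_nil (by exact_mod_cast by omega)]
    interval_cases n <;> decide
  · have hcast : ((n : Int) + 1) = ((n + 1 : Nat) : Int) := by push_cast; ring
    rw [hcast, build_vals (n + 1) (by omega), PySem.List.pyGetD_natCast,
        getD_map_range_xA (by omega)]
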